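-- pv_equiv track=rewrite | github.com/ameyer2145/CS115 | hw6.py | compressCount
-- ===== SOURCE A (Python) =====
-- def compressCount(S):
--     """Returns the count of how many times the first integer is consecutive"""
--     if S == '':
--         return 0
--     elif len(S) == 1:
--         return 1
--     elif S[0] == S[1]:
--         return 1 + compressCount(S[1:])
--     else:
--         return 1
-- ===== SOURCE B (Python) =====
-- def compressCount(S):
--     """Returns the count of how many times the first integer is consecutive"""
--     if S == '':
--         return 0
--     first = S[0]
--     count = 0
--     for ch in S:
--         if ch != first:
--             break
--         count += 1
--     return count
-- ===== Notes on version B (the rewrite author's own statement) =====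
-- stated objective: faster
-- what changed: Replaces the self-recursion on S[1:] (which copies the tail at every step) with a single bounded loop that counts characters equal to S[0] and breaks at the first mismatch.
import Mathlib
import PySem

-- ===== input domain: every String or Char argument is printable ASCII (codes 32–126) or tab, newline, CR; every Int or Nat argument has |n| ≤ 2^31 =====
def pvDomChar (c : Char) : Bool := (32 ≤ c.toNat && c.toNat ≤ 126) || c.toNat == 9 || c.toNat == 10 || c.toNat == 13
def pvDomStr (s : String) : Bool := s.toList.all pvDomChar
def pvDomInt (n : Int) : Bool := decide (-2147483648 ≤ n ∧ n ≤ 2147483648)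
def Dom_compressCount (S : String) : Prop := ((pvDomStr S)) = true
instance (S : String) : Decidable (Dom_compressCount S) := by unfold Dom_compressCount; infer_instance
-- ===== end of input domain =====

-- B replaces A's self-recursion on S[1:] with one loop counting characters equal to S[0] (simpler decomposition).


-- ===== PORT A =====
-- A's recursion, over the character list: empty → 0, single → 1,
-- S[0] == S[1] → 1 + recurse on S[1:], else 1.
def compressCountRec : List Char → Int
  | [] => 0
  | [_] => 1
  | c :: d :: rest => if c == d then 1 + compressCountRec (d :: rest) else 1

def compressCount (S : String) : Int := compressCountRec S.toList

-- ===== PORT B =====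
-- Source B's loop: for ch in S, break at first ch ≠ first, else count += 1.
def compressCountLoop (first : Char) : List Char → Int
  | [] => 0
  | c :: rest => if c != first then 0 else 1 + compressCountLoop first rest

def compressCount_alt (S : String) : Int :=
  match S.toList with
  | [] => 0
  | first :: _ => compressCountLoop first S.toList

-- ===== PRECONDITION & SPEC =====
def Spec_compressCount (S : String) (out : Int) : Prop := out = compressCount_alt S
instance (S : String) (out : Int) : Decidable (Spec_compressCount S out) := by unfold Spec_compressCount; infer_instance

-- ===== CLAIM (what is proved, stated in full; the proofs are below) =====
def Claim_equal_compressCount : Prop := ∀ (S : String), Dom_compressCount S → Spec_compressCount S (compressCount S)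

-- ===== LEMMAS AND PROOFS =====
theorem rec_eq_loop (l : List Char) (c : Char) :
    compressCountRec (c :: l) = compressCountLoop c (c :: l) := by
  induction l generalizing c with
  | nil => simp [compressCountRec, compressCountLoop]
  | cons d rest ih =>
    by_cases h : c = d
    · subst h
      simp [compressCountRec, compressCountLoop, ih]
    · simp [compressCountRec, compressCountLoop, h]
      intro hd; exact absurd hd.symm h

-- ===== VERDICT (by name: the statement is the Claim_ definition above) =====
theorem compressCount_spec : Claim_equal_compressCount := by
  intro S _
  unfold Spec_compressCount compressCount compressCount_alt
  cases h : S.toList with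
  | nil => simp [compressCountRec]
  | cons c rest => exact rec_eq_loop rest c
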